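-- pv_equiv track=rewrite | github.com/karimorozova13/mathematics | module4/hamming.py | remove_parity_bits
-- ===== SOURCE A (Python) =====
-- def remove_parity_bits(arr,p):
--     m = len(arr)
--     k = 0
--     result = []
--
--     for j in map(lambda x: 2**x, range(0, p-1)):
--         result += arr[k+1:j]
--         k = j
--
--     result += arr[k+1::]
--
--     return "".join(result)
-- ===== SOURCE B (Python) =====
-- def remove_parity_bits(arr, p):
--     removed = {0} | {2 ** x for x in range(p - 1)}
--     return "".join(s for i, s in enumerate(arr) if i not in removed)
-- ===== Notes on version B (the rewrite author's own statement) =====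
-- stated objective: simpler
-- what changed: Replaces A's loop of slice-concatenations between power-of-two boundaries with a precomputed set of removed indices ({0} and the powers 2^x for x < p-1) and a single element-wise filter over enumerate(arr).
import Mathlib
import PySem

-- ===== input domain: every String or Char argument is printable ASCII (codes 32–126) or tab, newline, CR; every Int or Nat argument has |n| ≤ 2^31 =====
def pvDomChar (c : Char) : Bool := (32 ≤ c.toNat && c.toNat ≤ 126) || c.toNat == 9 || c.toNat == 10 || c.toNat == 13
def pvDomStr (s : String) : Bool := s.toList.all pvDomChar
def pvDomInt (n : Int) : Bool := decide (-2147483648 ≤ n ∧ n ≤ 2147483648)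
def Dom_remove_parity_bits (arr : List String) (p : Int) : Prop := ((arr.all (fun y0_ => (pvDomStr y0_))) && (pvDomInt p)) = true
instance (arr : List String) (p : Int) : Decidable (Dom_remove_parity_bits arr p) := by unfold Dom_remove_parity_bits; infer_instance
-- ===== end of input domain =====

-- B replaces A's slice-concatenation between power-of-two boundaries by one element-wise
-- filter of enumerate(arr) against the precomputed set of removed indices (simpler, same cost).

-- ===== PORT A =====
-- state of A's loop: (k, result)
def remove_parity_bits (arr : List String) (p : Int) : String :=
  let st := ((PySem.List.pyRange 0 (p - 1)).map (fun x => (2 : Int) ^ x.toNat)).foldl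
      (fun (s : Int × List String) j =>
        (j, s.2 ++ PySem.List.slice arr (some (s.1 + 1)) (some j)))
      ((0 : Int), ([] : List String))
  PySem.Str.join "" (st.2 ++ PySem.List.slice arr (some (st.1 + 1)) none)

-- ===== PORT B =====
def remove_parity_bits_alt (arr : List String) (p : Int) : String :=
  let removed : PySem.Set Int :=
    PySem.Set.union (PySem.Set.ofList [0])
      (PySem.Set.ofList ((PySem.List.pyRange 0 (p - 1)).map (fun x => (2 : Int) ^ x.toNat)))
  PySem.Str.join ""
    (((PySem.List.enumerate arr).filter (fun q => !(PySem.Set.contains removed q.1))).map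
      (fun q => q.2))

-- ===== PRECONDITION & SPEC =====
def Spec_remove_parity_bits (arr : List String) (p : Int) (out : String) : Prop := out = remove_parity_bits_alt arr p
instance (arr : List String) (p : Int) (out : String) : Decidable (Spec_remove_parity_bits arr p out) := by unfold Spec_remove_parity_bits; infer_instance

-- ===== CLAIM (what is proved, stated in full; the proofs are below) =====
def Claim_equal_remove_parity_bits : Prop := ∀ (arr : List String) (p : Int), Dom_remove_parity_bits arr p → Spec_remove_parity_bits arr p (remove_parity_bits arr p)

-- ===== LEMMAS AND PROOFS =====

-- the power list A iterates over / B puts in its set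
def pvPows (p : Int) : List Int := (PySem.List.pyRange 0 (p - 1)).map (fun x => (2 : Int) ^ x.toNat)

def pvRemoved (p : Int) : PySem.Set Int :=
  PySem.Set.union (PySem.Set.ofList [0]) (PySem.Set.ofList (pvPows p))

-- B's keep-test on an index
def pvKept (p i : Int) : Bool := !(PySem.Set.contains (pvRemoved p) i)

-- B's kept elements whose index is ≥ c
def pvF (arr : List String) (p c : Int) : List String :=
  ((PySem.List.pyRange c (PySem.List.len arr)).filter (pvKept p)).map
    (fun i => PySem.List.pyGetD arr i "")

-- A's k after m loop iterations
def pvK (m : Nat) : Int := if m = 0 then 0 else 2 ^ (m - 1)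

theorem pvPows_eq (p : Int) : pvPows p = (List.range (p - 1).toNat).map (fun k => (2 : Int) ^ k) := by
  simp [pvPows, PySem.List.pyRange_one]

theorem pvMemPows (p i : Int) : i ∈ pvPows p ↔ ∃ k < (p - 1).toNat, i = (2 : Int) ^ k := by
  rw [pvPows_eq]
  simp [List.mem_map, List.mem_range, eq_comm]

theorem pvKept_zero (p : Int) : pvKept p 0 = false := by
  have : (0 : Int) ∈ pvRemoved p := by
    rw [pvRemoved, PySem.Set.mem_union]
    left; rw [PySem.Set.mem_ofList]; simp
  simpa [pvKept] using this


theorem pvKept_pow (p : Int) (k : Nat) (hk : k < (p - 1).toNat) :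
    pvKept p ((2 : Int) ^ k) = false := by
  have : ((2 : Int) ^ k) ∈ pvRemoved p := by
    rw [pvRemoved, PySem.Set.mem_union]
    right; rw [PySem.Set.mem_ofList, pvMemPows]
    exact ⟨k, hk, rfl⟩
  simpa [pvKept] using this


theorem pvKept_true (p i : Int) (h0 : i ≠ 0)
    (hp : ∀ k < (p - 1).toNat, i ≠ (2 : Int) ^ k) : pvKept p i = true := by
  have : i ∉ pvRemoved p := by
    rw [pvRemoved, PySem.Set.mem_union]
    rintro (h | h)
    · rw [PySem.Set.mem_ofList] at h; simp at h; exact h0 h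
    · rw [PySem.Set.mem_ofList, pvMemPows] at h
      obtain ⟨k, hk, hik⟩ := h
      exact hp k hk hik
  simpa [pvKept] using this


theorem pvB_eq (arr : List String) (p : Int) :
    remove_parity_bits_alt arr p = PySem.Str.join "" (pvF arr p 0) := by
  unfold remove_parity_bits_alt
  show PySem.Str.join ""
      (((PySem.List.enumerate arr).filter
          (fun q => !(PySem.Set.contains (pvRemoved p) q.1))).map (fun q => q.2)) = _
  rw [PySem.List.enumerate_eq_map_pyRange arr "", List.filter_map, List.map_map]
  simp [Function.comp_def, pvF]
  have hfc : List.filter (fun x : Int => !decide (x ∈ pvRemoved p))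
        (PySem.List.pyRange 0 (arr.length : Int))
      = List.filter (pvKept p) (PySem.List.pyRange 0 (arr.length : Int)) :=
    List.filter_congr (fun x _ => by simp [pvKept])
  rw [hfc]


theorem pvMapGetRange (arr : List String) (c j : Int) (h0 : 0 ≤ c) (hcj : c ≤ j)
    (hjL : j ≤ PySem.List.len arr) :
    (PySem.List.pyRange c j).map (fun i => PySem.List.pyGetD arr i "")
      = (arr.drop c.toNat).take (j.toNat - c.toNat) := by
  have hsplit := PySem.List.pyRange_one_append c j (PySem.List.len arr) hcj hjL
  have hfull := PySem.List.map_pyGetD_pyRange arr "" h0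
  rw [hsplit, List.map_append] at hfull
  have hlen : ((PySem.List.pyRange c j).map (fun i => PySem.List.pyGetD arr i "")).length
      = j.toNat - c.toNat := by
    rw [List.length_map, PySem.List.length_pyRange_one]; omega
  calc (PySem.List.pyRange c j).map (fun i => PySem.List.pyGetD arr i "")
      = (((PySem.List.pyRange c j).map (fun i => PySem.List.pyGetD arr i ""))
          ++ ((PySem.List.pyRange j (PySem.List.len arr)).map
              (fun i => PySem.List.pyGetD arr i ""))).take
          ((PySem.List.pyRange c j).map (fun i => PySem.List.pyGetD arr i "")).length := by
        rw [List.take_left]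
    _ = (arr.drop c.toNat).take (j.toNat - c.toNat) := by rw [hfull, hlen]


theorem pvF_tail (arr : List String) (p c : Int) (h0 : 0 ≤ c)
    (hall : ∀ i, c ≤ i → i < PySem.List.len arr → pvKept p i = true) :
    pvF arr p c = arr.drop c.toNat := by
  unfold pvF
  rw [List.filter_eq_self.mpr, PySem.List.map_pyGetD_pyRange arr "" h0]
  intro i hi
  rw [PySem.List.mem_pyRange_one] at hi
  exact hall i hi.1 hi.2


theorem pvF_split (arr : List String) (p c j : Int) (h0 : 0 ≤ c) (hcj : c ≤ j)
    (hmid : ∀ i, c ≤ i → i < j → pvKept p i = true) (hj : pvKept p j = false) :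
    pvF arr p c = PySem.List.slice arr (some c) (some j) ++ pvF arr p (j + 1) := by
  have hj0 : 0 ≤ j := le_trans h0 hcj
  by_cases hjL : j < PySem.List.len arr
  · unfold pvF
    rw [PySem.List.pyRange_one_append c j (PySem.List.len arr) hcj (le_of_lt hjL),
        PySem.List.pyRange_one_cons hjL, List.filter_append, List.filter_cons]
    rw [List.filter_eq_self.mpr (by
      intro i hi
      rw [PySem.List.mem_pyRange_one] at hi
      exact hmid i hi.1 hi.2)]
    rw [hj]
    simp only [if_neg (by simp : ¬ (false = true)), List.map_append]
    rw [pvMapGetRange arr c j h0 hcj (le_of_lt hjL),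
        PySem.List.slice_toNat arr h0 hj0]
  · rw [not_lt] at hjL
    rw [pvF_tail arr p c h0 (fun i hi hiL => hmid i hi (lt_of_lt_of_le hiL hjL))]
    have hFj : pvF arr p (j + 1) = [] := by
      unfold pvF
      rw [PySem.List.pyRange_one_eq_nil (by omega)]
      simp
    rw [hFj, List.append_nil, PySem.List.slice_toNat arr h0 hj0]
    have hlen : arr.length = (PySem.List.len arr).toNat := by simp [PySem.List.len]
    rw [List.take_of_length_le (by rw [List.length_drop]; omega)]


theorem pvK_nonneg (m : Nat) : 0 ≤ pvK m := by
  unfold pvK; split_ifs <;> positivity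

theorem pvLoop (arr : List String) (p : Int) (m : Nat) (hm : m ≤ (p - 1).toNat) :
    ∃ R, ((List.range m).map (fun k => (2 : Int) ^ k)).foldl
        (fun (s : Int × List String) j =>
          (j, s.2 ++ PySem.List.slice arr (some (s.1 + 1)) (some j)))
        ((0 : Int), ([] : List String)) = (pvK m, R)
      ∧ R ++ pvF arr p (pvK m + 1) = pvF arr p 0 := by
  induction m with
  | zero =>
    refine ⟨[], rfl, ?_⟩
    have h := pvF_split arr p 0 0 le_rfl le_rfl (by omega) (pvKept_zero p)
    rw [h]
    show pvF arr p (0 + 1) = _ ++ pvF arr p (0 + 1)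
    rw [PySem.List.slice_toNat arr le_rfl le_rfl]
    simp
  | succ m ih =>
    obtain ⟨R, hfold, hR⟩ := ih (by omega)
    refine ⟨R ++ PySem.List.slice arr (some (pvK m + 1)) (some ((2 : Int) ^ m)), ?_, ?_⟩
    · rw [List.range_succ, List.map_append, List.foldl_append, hfold]
      simp [pvK]
    · rw [List.append_assoc]
      have hK1 : pvK (m + 1) = (2 : Int) ^ m := by simp [pvK]
      rw [hK1]
      have hstep : PySem.List.slice arr (some (pvK m + 1)) (some ((2 : Int) ^ m))
          ++ pvF arr p ((2 : Int) ^ m + 1) = pvF arr p (pvK m + 1) := by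
        have hK := pvK_nonneg m
        refine (pvF_split arr p (pvK m + 1) ((2 : Int) ^ m) (by omega) ?_ ?_ ?_).symm
        · unfold pvK
          split_ifs with h
          · subst h; norm_num
          · have : (2 : Nat) ^ (m - 1) < 2 ^ m := Nat.pow_lt_pow_right (by omega) (by omega)
            have h2 : ((2 : Nat) ^ (m - 1) : Int) < ((2 : Nat) ^ m : Int) := by exact_mod_cast this
            push_cast at h2 ⊢
            omega
        · intro i hi hilt
          apply pvKept_true
          · omega
          · intro k hk hik
            subst hik
            have hkm : k < m := by
              have : (2 : Nat) ^ k < 2 ^ m := by exact_mod_cast hilt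
              exact (Nat.pow_lt_pow_iff_right (by omega)).mp this
            have hle : (2 : Int) ^ k ≤ pvK m := by
              unfold pvK
              split_ifs with h
              · omega
              · have : (2 : Nat) ^ k ≤ 2 ^ (m - 1) := Nat.pow_le_pow_right (by omega) (by omega)
                exact_mod_cast this
            omega
        · exact pvKept_pow p m hm
      rw [hstep]
      exact hR


-- ===== VERDICT (by name: the statement is the Claim_ definition above) =====
theorem remove_parity_bits_spec : Claim_equal_remove_parity_bits := by
  intro arr p _
  unfold Spec_remove_parity_bits
  rw [pvB_eq]
  obtain ⟨R, hfold, hR⟩ := pvLoop arr p (p - 1).toNat le_rfl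
  unfold remove_parity_bits
  have hpows : ((PySem.List.pyRange 0 (p - 1)).map (fun x => (2 : Int) ^ x.toNat))
      = (List.range (p - 1).toNat).map (fun k => (2 : Int) ^ k) := pvPows_eq p
  rw [hpows, hfold]
  show PySem.Str.join ""
      (R ++ PySem.List.slice arr (some (pvK (p - 1).toNat + 1)) none)
    = PySem.Str.join "" (pvF arr p 0)
  have htail : pvF arr p (pvK (p - 1).toNat + 1) = arr.drop (pvK (p - 1).toNat + 1).toNat := by
    apply pvF_tail arr p _ (by have := pvK_nonneg (p - 1).toNat; omega)
    intro i hi _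
    apply pvKept_true
    · have := pvK_nonneg (p - 1).toNat; omega
    · intro k hk
      have hle : (2 : Int) ^ k ≤ pvK (p - 1).toNat := by
        unfold pvK
        split_ifs with h
        · omega
        · have : (2 : Nat) ^ k ≤ 2 ^ ((p - 1).toNat - 1) :=
            Nat.pow_le_pow_right (by omega) (by omega)
          exact_mod_cast this
      omega
  rw [PySem.List.slice_from arr (by have := pvK_nonneg (p - 1).toNat; omega), ← htail, hR]
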